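-- pv_equiv track=rewrite | github.com/Belco90/python-basic-exercises | exercises.py | draw_rectangle_borders
-- ===== SOURCE A (Python) =====
-- def draw_rectangle_borders(x, y):
--     """Generates a string with a rectangle borders made of * symbols with `x` columns and `y` rows.
--
--     Examples:
--         >>> print draw_rectangle_borders(1, 1)
--         *
--
--         >>> print draw_rectangle_borders(2, 2)
--         **
--         **
--
--         >>> print draw_rectangle_borders(3, 3)
--         ***
--         * *
--         ***
--
--         >>> print draw_rectangle_borders(5, 9)
--         *****
--         *   *
--         *   *
--         *   *
--         *   *
--         *   *
--         *   *
--         *   *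
--         *****
--
--         >>> print draw_rectangle_borders(9, 5)
--         *********
--         *       *
--         *       *
--         *       *
--         *********
--
--     :param x: Number of columns (width)
--     :param y: Number of rows (height)
--     :return: String containing corresponding rectangle border
--     """
--     outer_row = "*" * x
--     inner_whitespace_row = " " * (x - 2)
--
--     result = ""
--     for j in range(y):
--
--         # last row
--         if j == (y - 1):
--             result += outer_row
--
--         # first row
--         elif j == 0:
--             result += (outer_row + "\n")
--
--         else:
--             new_inner_row = "*"
--
--             if x > 1:
--                 new_inner_row += (inner_whitespace_row + "*")
--
--             new_inner_row += "\n"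
--
--             result += new_inner_row
--
--     return result
-- ===== SOURCE B (Python) =====
-- def draw_rectangle_borders(x, y):
--     n = len(range(y))
--     return "\n".join(
--         "".join("*" if i == 0 or i == x - 1 or j == 0 or j == n - 1 else " "
--                 for i in range(x))
--         for j in range(y))
-- ===== Notes on version B (the rewrite author's own statement) =====
-- stated objective: alternative
-- what changed: Replaces A's per-row loop with first/last-row branching and string += by a per-cell border predicate: every character is computed independently as '*' iff its cell lies on the first/last row or column, then cells are joined into rows and rows joined with newlines.
-- intended difference: For x <= 0 and y >= 3 A still emits a lone '*' on every middle row of a zero-or-negative-width rectangle (e.g. '\n*\n' for (0,3)), while B's border predicate yields empty rows ('\n\n'), the intended picture of a width-0 rectangle. — e.g. on draw_rectangle_borders(0, 3): A returns "\n*\n", B returns "\n\n"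
import Mathlib
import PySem

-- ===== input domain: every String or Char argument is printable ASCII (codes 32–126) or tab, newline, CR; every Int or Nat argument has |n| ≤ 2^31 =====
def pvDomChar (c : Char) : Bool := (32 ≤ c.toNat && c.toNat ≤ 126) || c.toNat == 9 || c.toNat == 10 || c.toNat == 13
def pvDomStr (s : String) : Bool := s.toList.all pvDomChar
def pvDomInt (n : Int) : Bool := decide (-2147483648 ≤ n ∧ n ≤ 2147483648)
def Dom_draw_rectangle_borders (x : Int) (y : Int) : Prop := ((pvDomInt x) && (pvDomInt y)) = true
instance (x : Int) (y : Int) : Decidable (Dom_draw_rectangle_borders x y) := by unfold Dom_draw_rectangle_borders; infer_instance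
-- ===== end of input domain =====

-- B computes each character independently from a border predicate on its (row, column)
-- cell instead of A's per-row loop with first/last-row branching (alternative algorithm, same cost).

-- ===== PORT A =====
-- literal transliteration of A: per-row loop over range(y), appending to a string accumulator
def draw_rectangle_borders (x : Int) (y : Int) : String :=
  let outer_row : List Char := PySem.List.pyRepeat ['*'] x
  let inner_whitespace_row : List Char := PySem.List.pyRepeat [' '] (x - 2)
  let result : List Char :=
    (PySem.List.pyRange 0 y 1).foldl (fun r j =>
      if j == y - 1 then r ++ outer_row
      else if j == 0 then r ++ (outer_row ++ ['\n'])
      else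
        let new_inner_row : List Char := ['*']
        let new_inner_row := if x > 1 then new_inner_row ++ (inner_whitespace_row ++ ['*']) else new_inner_row
        let new_inner_row := new_inner_row ++ ['\n']
        r ++ new_inner_row) []
  String.mk result

-- ===== PORT B =====
-- literal transliteration of B: n = len(range(y)); per-cell predicate, rows joined with '\n'
def draw_rectangle_borders_alt (x : Int) (y : Int) : String :=
  let n : Int := ((PySem.List.pyRange 0 y 1).length : Int)
  String.mk (PySem.Chars.join ['\n']
    ((PySem.List.pyRange 0 y 1).map (fun j =>
      (PySem.List.pyRange 0 x 1).map (fun i =>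
        if i == 0 || i == x - 1 || j == 0 || j == n - 1 then '*' else ' '))))

-- ===== PRECONDITION & SPEC =====
-- For x <= 0 and y >= 3 A still emits a lone '*' on every middle row of a zero-or-negative-width
-- rectangle, while B's border predicate yields empty rows, the intended picture of a width-0 rectangle.
def D_draw_rectangle_borders (x : Int) (y : Int) : Prop := x ≤ 0 ∧ 3 ≤ y
instance (x : Int) (y : Int) : Decidable (D_draw_rectangle_borders x y) := by unfold D_draw_rectangle_borders; infer_instance
def Spec_draw_rectangle_borders (x : Int) (y : Int) (out : String) : Prop := ¬ D_draw_rectangle_borders x y → out = draw_rectangle_borders_alt x y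
instance (x : Int) (y : Int) (out : String) : Decidable (Spec_draw_rectangle_borders x y out) := by unfold Spec_draw_rectangle_borders; infer_instance
def pvDiffWitness_draw_rectangle_borders : Int × Int := (0, 3)
def pvDiffWitnessOut_draw_rectangle_borders : String × String := ("\n*\n", "\n\n")

-- ===== CLAIM (what is proved, stated in full; the proofs are below) =====
def Claim_unchanged_draw_rectangle_borders : Prop := ∀ (x : Int) (y : Int), Dom_draw_rectangle_borders x y → Spec_draw_rectangle_borders x y (draw_rectangle_borders x y)
def Claim_changed_draw_rectangle_borders : Prop := Dom_draw_rectangle_borders (pvDiffWitness_draw_rectangle_borders.1) (pvDiffWitness_draw_rectangle_borders.2) ∧ D_draw_rectangle_borders (pvDiffWitness_draw_rectangle_borders.1) (pvDiffWitness_draw_rectangle_borders.2) ∧ draw_rectangle_borders (pvDiffWitness_draw_rectangle_borders.1) (pvDiffWitness_draw_rectangle_borders.2) = pvDiffWitnessOut_draw_rectangle_borders.1 ∧ draw_rectangle_borders_alt (pvDiffWitness_draw_rectangle_borders.1) (pvDiffWitness_draw_rectangle_borders.2) = pvDiffWitnessOut_draw_rectangle_borders.2 ∧ pvDiffWitnessOut_draw_rectangle_borders.1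 ≠ pvDiffWitnessOut_draw_rectangle_borders.2
def Claim_exact_draw_rectangle_borders : Prop := ∀ (x : Int) (y : Int), Dom_draw_rectangle_borders x y → D_draw_rectangle_borders x y → draw_rectangle_borders x y ≠ draw_rectangle_borders_alt x y

-- ===== LEMMAS AND PROOFS =====

-- the per-row string A appends at index j (proof-only helper)
def rowG (x y : Int) (j : Int) : List Char :=
  if j == y - 1 then PySem.List.pyRepeat ['*'] x
  else if j == 0 then PySem.List.pyRepeat ['*'] x ++ ['\n']
  else (if x > 1 then ['*'] ++ (PySem.List.pyRepeat [' '] (x - 2) ++ ['*']) else ['*']) ++ ['\n']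

-- A's middle row (proof-only helper)
def midA (x : Int) : List Char :=
  if x > 1 then ['*'] ++ (PySem.List.pyRepeat [' '] (x - 2) ++ ['*']) else ['*']

-- B's row at index j, with n the row count (proof-only helper)
def rowB (x n : Int) (j : Int) : List Char :=
  (PySem.List.pyRange 0 x 1).map (fun i =>
    if i == 0 || i == x - 1 || j == 0 || j == n - 1 then '*' else ' ')

lemma A_flat (x y : Int) :
    draw_rectangle_borders x y = String.mk ((PySem.List.pyRange 0 y 1).flatMap (rowG x y)) := by
  unfold draw_rectangle_borders
  refine congrArg String.mk ?_
  have hf : (fun (r : List Char) (j : Int) =>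
      if j == y - 1 then r ++ PySem.List.pyRepeat ['*'] x
      else if j == 0 then r ++ (PySem.List.pyRepeat ['*'] x ++ ['\n'])
      else
        let new_inner_row : List Char := ['*']
        let new_inner_row := if x > 1 then new_inner_row ++ (PySem.List.pyRepeat [' '] (x - 2) ++ ['*']) else new_inner_row
        let new_inner_row := new_inner_row ++ ['\n']
        r ++ new_inner_row) = fun r j => r ++ rowG x y j := by
    funext r j
    unfold rowG
    dsimp only
    split_ifs <;> rfl
  dsimp only
  rw [hf, PySem.List.foldl_append_eq_flatMap, List.nil_append]

lemma B_rows (x y : Int) :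
    draw_rectangle_borders_alt x y =
      String.mk (PySem.Chars.join ['\n']
        ((PySem.List.pyRange 0 y 1).map (rowB x ((PySem.List.pyRange 0 y 1).length : Int)))) := rfl

lemma flatMap_const (l : List Int) (c : List Char) :
    l.flatMap (fun _ => c) = (List.replicate l.length c).flatten := by
  induction l with
  | nil => rfl
  | cons a l ih => simp [List.flatMap_cons, ih, List.replicate_succ]

-- join with newline over (replicate k inner ++ [outer]) flattens to k copies of (inner ++ '\n') then outer
lemma join_replicate_last (k : Nat) (inn out : List Char) :
    PySem.Chars.join ['\n'] (List.replicate k inn ++ [out]) =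
      (List.replicate k (inn ++ ['\n'])).flatten ++ out := by
  induction k with
  | zero => simp [PySem.Chars.join_singleton]
  | succ k ih =>
    obtain ⟨b, l, hbl⟩ : ∃ b l, List.replicate k inn ++ [out] = b :: l := by
      cases h : List.replicate k inn ++ [out] with
      | nil => simp at h
      | cons b l => exact ⟨b, l, rfl⟩
    rw [List.replicate_succ, List.cons_append, hbl, PySem.Chars.join_cons_cons, ← hbl, ih]
    simp [List.replicate_succ, List.append_assoc]

lemma join_rect (k : Nat) (inn out : List Char) :
    PySem.Chars.join ['\n'] ([out] ++ List.replicate k inn ++ [out]) =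
      out ++ '\n' :: ((List.replicate k (inn ++ ['\n'])).flatten ++ out) := by
  obtain ⟨b, l, hbl⟩ : ∃ b l, List.replicate k inn ++ [out] = b :: l := by
    cases h : List.replicate k inn ++ [out] with
    | nil => simp at h
    | cons b l => exact ⟨b, l, rfl⟩
  rw [List.append_assoc, List.singleton_append, hbl, PySem.Chars.join_cons_cons, ← hbl,
    join_replicate_last]
  simp [List.append_assoc]

-- B's first and last rows are the full star row
lemma rowB_first (x n : Int) : rowB x n 0 = List.replicate x.toNat '*' := by
  unfold rowB
  have : ∀ i : Int, (if i == 0 || i == x - 1 || (0:Int) == 0 || (0:Int) == n - 1 then '*' else ' ') = '*' := by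
    intro i; simp
  simp only [this]
  rw [List.map_const', PySem.List.length_pyRange_one]
  congr 1; omega

lemma rowB_last (x n : Int) : rowB x n (n - 1) = List.replicate x.toNat '*' := by
  unfold rowB
  have : ∀ i : Int, (if i == 0 || i == x - 1 || (n-1:Int) == 0 || (n-1:Int) == n - 1 then '*' else ' ') = '*' := by
    intro i; simp
  simp only [this]
  rw [List.map_const', PySem.List.length_pyRange_one]
  congr 1; omega

-- B's middle rows for positive width agree with A's middle row
lemma rowB_mid (x n j : Int) (hx : 1 ≤ x) (hj0 : j ≠ 0) (hjl : j ≠ n - 1) :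
    rowB x n j = midA x := by
  unfold rowB midA
  by_cases hx1 : x = 1
  · subst hx1
    rw [if_neg (by norm_num)]
    have h1 : PySem.List.pyRange 0 1 1 = [0] := by
      simpa using PySem.List.pyRange_one_singleton 0
    rw [h1]
    simp
  · have hx2 : 2 ≤ x := by omega
    rw [if_pos (by omega)]
    have hsplit : PySem.List.pyRange 0 x 1 = 0 :: (PySem.List.pyRange 1 (x - 1) 1 ++ [x - 1]) := by
      rw [PySem.List.pyRange_one_cons (by omega : (0:Int) < x)]
      have h := PySem.List.pyRange_one_succ_right (by omega : (1:Int) ≤ x - 1)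
      rw [show x - 1 + 1 = x by ring] at h
      rw [show (0:Int) + 1 = 1 from by norm_num, h]
    rw [hsplit, List.map_cons, List.map_append, List.map_singleton]
    have hfirst : (if (0:Int) == 0 || (0:Int) == x - 1 || j == 0 || j == n - 1 then '*' else ' ') = '*' := by simp
    have hlast : (if (x-1:Int) == 0 || (x-1:Int) == x - 1 || j == 0 || j == n - 1 then '*' else ' ') = '*' := by simp
    rw [hfirst, hlast]
    have hmid : (PySem.List.pyRange 1 (x - 1) 1).map (fun i =>
        if i == 0 || i == x - 1 || j == 0 || j == n - 1 then '*' else ' ') =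
        List.replicate (x - 2).toNat ' ' := by
      rw [List.map_congr_left (g := fun _ => ' ') (by
        intro i hi
        rw [PySem.List.mem_pyRange_one] at hi
        have hc : (i == 0 || i == x - 1 || j == 0 || j == n - 1) = false := by
          simp only [Bool.or_eq_false_iff, beq_eq_false_iff_ne, ne_eq]
          omega
        rw [hc]
        rfl)]
      rw [List.map_const', PySem.List.length_pyRange_one]
      congr 1; omega
    rw [hmid, PySem.List.pyRepeat_singleton]
    simp

-- common characterization of both outputs for y ≥ 2
lemma A_char (x y : Int) (hy : 2 ≤ y) :
    draw_rectangle_borders x y =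
      String.mk (List.replicate x.toNat '*' ++ '\n' ::
        ((List.replicate (y - 2).toNat (midA x ++ ['\n'])).flatten ++ List.replicate x.toNat '*')) := by
  rw [A_flat]
  refine congrArg String.mk ?_
  have hsplit : PySem.List.pyRange 0 y 1 = 0 :: (PySem.List.pyRange 1 (y - 1) 1 ++ [y - 1]) := by
    rw [PySem.List.pyRange_one_cons (by omega : (0:Int) < y)]
    have h := PySem.List.pyRange_one_succ_right (by omega : (1:Int) ≤ y - 1)
    rw [show y - 1 + 1 = y by ring] at h
    rw [show (0:Int) + 1 = 1 from by norm_num, h]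
  rw [hsplit, List.flatMap_cons, List.flatMap_append, List.flatMap_cons, List.flatMap_nil,
    List.append_nil]
  have hg0 : rowG x y 0 = PySem.List.pyRepeat ['*'] x ++ ['\n'] := by
    unfold rowG
    rw [if_neg (by simp; omega), if_pos (by simp)]
  have hglast : rowG x y (y - 1) = PySem.List.pyRepeat ['*'] x := by
    unfold rowG; rw [if_pos (by simp)]
  have hmid : (PySem.List.pyRange 1 (y - 1) 1).flatMap (rowG x y) =
      (List.replicate (y - 2).toNat (midA x ++ ['\n'])).flatten := by
    have hcongr : ∀ j ∈ PySem.List.pyRange 1 (y - 1) 1, rowG x y j = midA x ++ ['\n'] := by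
      intro j hj
      rw [PySem.List.mem_pyRange_one] at hj
      unfold rowG midA
      rw [if_neg (by simp; omega), if_neg (by simp; omega)]
    rw [List.flatMap_congr hcongr, flatMap_const, PySem.List.length_pyRange_one,
      show ((y:Int) - 1 - 1).toNat = (y - 2).toNat from by omega]
  rw [hg0, hglast, hmid, PySem.List.pyRepeat_singleton]
  simp [List.append_assoc]

lemma B_char (x y : Int) (hy : 2 ≤ y) (mid : List Char)
    (hmid : ∀ j ∈ PySem.List.pyRange 1 (y - 1) 1, rowB x y j = mid) :
    draw_rectangle_borders_alt x y =
      String.mk (List.replicate x.toNat '*' ++ '\n' ::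
        ((List.replicate (y - 2).toNat (mid ++ ['\n'])).flatten ++ List.replicate x.toNat '*')) := by
  rw [B_rows]
  have hn : ((PySem.List.pyRange 0 y 1).length : Int) = y := by
    rw [PySem.List.length_pyRange_one]; omega
  rw [hn]
  refine congrArg String.mk ?_
  have hsplit : PySem.List.pyRange 0 y 1 = 0 :: (PySem.List.pyRange 1 (y - 1) 1 ++ [y - 1]) := by
    rw [PySem.List.pyRange_one_cons (by omega : (0:Int) < y)]
    have h := PySem.List.pyRange_one_succ_right (by omega : (1:Int) ≤ y - 1)
    rw [show y - 1 + 1 = y by ring] at h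
    rw [show (0:Int) + 1 = 1 from by norm_num, h]
  rw [hsplit, List.map_cons, List.map_append, List.map_singleton, rowB_first, rowB_last,
    List.map_congr_left hmid, List.map_const', PySem.List.length_pyRange_one,
    show ((y:Int) - 1 - 1).toNat = (y - 2).toNat from by omega]
  exact join_rect (y - 2).toNat mid (List.replicate x.toNat '*')

-- B's middle rows are empty for nonpositive width
lemma rowB_nonpos (x n j : Int) (hx : x ≤ 0) : rowB x n j = [] := by
  unfold rowB
  rw [PySem.List.pyRange_one_eq_nil (by omega)]
  rfl

-- ===== VERDICT (by name: the statements are the Claim_ definitions above) =====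
theorem draw_rectangle_borders_spec : Claim_unchanged_draw_rectangle_borders := by
  intro x y _ hD
  show draw_rectangle_borders x y = draw_rectangle_borders_alt x y
  by_cases h0 : y ≤ 0
  · rw [A_flat, B_rows, PySem.List.pyRange_one_eq_nil h0]
    rfl
  · push_neg at h0
    by_cases h1 : y = 1
    · subst h1
      rw [A_flat, B_rows]
      have hone : PySem.List.pyRange 0 1 1 = [0] := by
        simpa using PySem.List.pyRange_one_singleton 0
      rw [hone]
      refine congrArg String.mk ?_
      rw [List.flatMap_cons, List.flatMap_nil, List.append_nil, List.map_singleton,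
        PySem.Chars.join_singleton, rowB_first]
      unfold rowG
      rw [if_pos (by simp), PySem.List.pyRepeat_singleton]
    · have hy2 : 2 ≤ y := by omega
      by_cases hy3 : y = 2
      · rw [A_char x y hy2, B_char x y hy2 (midA x) (by
          intro j hj
          rw [PySem.List.mem_pyRange_one] at hj
          exfalso; omega)]
      · have hx1 : 1 ≤ x := by
          by_contra hx
          exact hD ⟨by omega, by omega⟩
        rw [A_char x y hy2, B_char x y hy2 (midA x) (by
          intro j hj
          rw [PySem.List.mem_pyRange_one] at hj
          exact rowB_mid x y j hx1 (by omega) (by omega))]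

theorem draw_rectangle_borders_changed : Claim_changed_draw_rectangle_borders := by
  unfold Claim_changed_draw_rectangle_borders; decide

theorem draw_rectangle_borders_tight : Claim_exact_draw_rectangle_borders := by
  intro x y _ hD
  obtain ⟨hx, hy⟩ := hD
  rw [A_char x y (by omega), B_char x y (by omega) [] (fun j _ => rowB_nonpos x y j hx)]
  have hx0 : x.toNat = 0 := by omega
  have hmidA : midA x = ['*'] := by unfold midA; rw [if_neg (by omega)]
  obtain ⟨m, hm⟩ : ∃ m, (y - 2).toNat = m + 1 := ⟨(y - 3).toNat, by omega⟩
  rw [hx0, hmidA, hm]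
  intro h
  have h' := String.ofList_inj.mp h
  simp [List.replicate_succ] at h'
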